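-- pv_equiv track=rewrite | github.com/johngerving/YOLO-Bird-Detection | bird_detect.py | calculate_clip_bounds
-- ===== SOURCE A (Python) =====
-- def calculate_clip_bounds(batches, num_frames, padding=90):
--     '''Calculates the start and end indices of the clips where detections occurred.
--
--     :param batches: A generator object, with each entry containing a NumPy boolean array, each entry corresponding to a frame and True representing a detection occurring.
--     :param num_frames: The total number of frames in the video.
--     :param padding: The number of frames before and after the detection to include as padding in the clips.
--
--     :return: A two-dimensional list, with each element having two elements representing the start and end frame index of a clip.
--     '''
--
--     currently_reading_clip = False
--     frame_index = 0
--     frames_since_last_detection = 0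
--
--     clips = []
--
--     # Loop through batches
--     for batch in batches:
--         # Loop through each frame
--         for frame in batch:
--             if frame == True:
--                 # Reset frames since last detection if there was a detection in the frame
--                 frames_since_last_detection = 0
--
--                 # If a clip isn't already being read, add a new entry to the clips with the current frame index
--                 if not currently_reading_clip:
--                     currently_reading_clip = True
--                     start = max(frame_index - padding, 0)
--                     clips.append([start])
--             else:
--                 # Update frames since last detection if no detection in frame
--                 frames_since_last_detection += 1
--
--                 # If there is a clip currently being read and the frames since the last detection exceeds the padding, end the current clip and reset variables
--                 if currently_reading_clip and frames_since_last_detection > padding: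
--                     end = frame_index
--
--                     clips[-1].append(end)
--
--                     currently_reading_clip = False
--                     frames_since_last_detection = 0
--
--             frame_index += 1
--
--     if len(clips) > 0 and len(clips[-1]) < 2:
--         clips[-1].append(num_frames - 1)
--
--     return clips
-- ===== SOURCE B (Python) =====
-- def calculate_clip_bounds(batches, num_frames, padding=90):
--     # Collect the index of every detection frame in one pass, then group
--     # detections into clips by gap size; no per-frame state machine.
--     detections = []
--     n = 0
--     for batch in batches:
--         for frame in batch:
--             if frame == True:
--                 detections.append(n)
--             n += 1
--     if not detections:
--         return []
--     q = max(padding, 0) + 1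
--     groups = []
--     cur = (detections[0], detections[0])
--     for d in detections[1:]:
--         if d - cur[1] > q:
--             groups.append(cur)
--             cur = (d, d)
--         else:
--             cur = (cur[0], d)
--     groups.append(cur)
--     clips = []
--     for first, last in groups:
--         if last + q < n:
--             clips.append([max(first - padding, 0), last + q])
--         else:
--             clips.append([max(first - padding, 0), num_frames - 1])
--     return clips
-- ===== Notes on version B (the rewrite author's own statement) =====
-- stated objective: alternative
-- what changed: Replaces A's per-frame state machine (reading flag, frames-since-last-detection counter, in-place clip patching) with a two-phase approach: collect all detection indices in one pass, then group them by gap > padding+1 and emit each clip's bounds by closed formulas.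
import Mathlib
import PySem

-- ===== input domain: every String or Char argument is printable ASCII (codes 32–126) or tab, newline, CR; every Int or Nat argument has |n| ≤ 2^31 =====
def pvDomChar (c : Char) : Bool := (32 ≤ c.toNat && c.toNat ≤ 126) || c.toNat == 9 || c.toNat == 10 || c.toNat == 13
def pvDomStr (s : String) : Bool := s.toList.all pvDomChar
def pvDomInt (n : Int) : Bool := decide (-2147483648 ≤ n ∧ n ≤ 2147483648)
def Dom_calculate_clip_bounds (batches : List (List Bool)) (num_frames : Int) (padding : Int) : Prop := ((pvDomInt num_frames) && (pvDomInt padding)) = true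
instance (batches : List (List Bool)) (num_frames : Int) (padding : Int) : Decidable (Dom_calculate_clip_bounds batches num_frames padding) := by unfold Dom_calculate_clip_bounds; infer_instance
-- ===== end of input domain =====

-- B replaces A's per-frame state machine by collecting detection indices and grouping
-- them by gap size, emitting clip bounds by closed formulas (objective: alternative).

-- ===== PORT A =====
-- clips[-1].append(x): append x to the last inner list ([] case is unreachable in A)
def pvAppendLast (clips : List (List Int)) (x : Int) : List (List Int) :=
  match clips with
  | [] => []
  | [c] => [c ++ [x]]
  | c :: rest => c :: pvAppendLast rest x

-- state: (currently_reading_clip, frame_index, frames_since_last_detection, clips)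
def pvAStep (padding : Int) (st : Bool × Int × Int × List (List Int)) (frame : Bool) :
    Bool × Int × Int × List (List Int) :=
  match st with
  | (reading, i, cnt, clips) =>
    if frame = true then
      if !reading then (true, i + 1, 0, clips ++ [[max (i - padding) 0]])
      else (true, i + 1, 0, clips)
    else
      let cnt' := cnt + 1
      if reading && decide (cnt' > padding) then
        (false, i + 1, 0, pvAppendLast clips i)
      else (reading, i + 1, cnt', clips)

def calculate_clip_bounds (batches : List (List Bool)) (num_frames : Int) (padding : Int) : List (List Int) :=
  let st := batches.foldl (fun st batch => batch.foldl (pvAStep padding) st) (false, 0, 0, [])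
  let clips := st.2.2.2
  match clips.getLast? with
  | some c => if c.length < 2 then pvAppendLast clips (num_frames - 1) else clips
  | none => clips

-- ===== PORT B =====
-- one pass: collect detection frame indices, count frames
def pvBStep (st : List Int × Int) (frame : Bool) : List Int × Int :=
  ((if frame = true then st.1 ++ [st.2] else st.1), st.2 + 1)

-- grouping: state (finished groups, current (first, last))
def pvGroupStep (q : Int) (st : List (Int × Int) × Int × Int) (d : Int) :
    List (Int × Int) × Int × Int :=
  if d - st.2.2 > q then (st.1 ++ [st.2], d, d) else (st.1, st.2.1, d)

def calculate_clip_bounds_alt (batches : List (List Bool)) (num_frames : Int) (padding : Int) : List (List Int) :=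
  let dn := batches.foldl (fun st batch => batch.foldl pvBStep st) ([], 0)
  match dn.1 with
  | [] => []
  | d0 :: rest =>
    let q := max padding 0 + 1
    let gc := rest.foldl (pvGroupStep q) ([], d0, d0)
    (gc.1 ++ [gc.2]).map (fun g =>
      if g.2 + q < dn.2 then [max (g.1 - padding) 0, g.2 + q]
      else [max (g.1 - padding) 0, num_frames - 1])

-- ===== PRECONDITION & SPEC =====
def Spec_calculate_clip_bounds (batches : List (List Bool)) (num_frames : Int) (padding : Int) (out : List (List Int)) : Prop := out = calculate_clip_bounds_alt batches num_frames padding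
instance (batches : List (List Bool)) (num_frames : Int) (padding : Int) (out : List (List Int)) : Decidable (Spec_calculate_clip_bounds batches num_frames padding out) := by unfold Spec_calculate_clip_bounds; infer_instance

-- ===== CLAIM (what is proved, stated in full; the proofs are below) =====
def Claim_equal_calculate_clip_bounds : Prop := ∀ (batches : List (List Bool)) (num_frames : Int) (padding : Int), Dom_calculate_clip_bounds batches num_frames padding → Spec_calculate_clip_bounds batches num_frames padding (calculate_clip_bounds batches num_frames padding)

-- ===== LEMMAS AND PROOFS =====

lemma pvAppendLast_append (xs : List (List Int)) (c : List Int) (x : Int) :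
    pvAppendLast (xs ++ [c]) x = xs ++ [c ++ [x]] := by
  induction xs with
  | nil => rfl
  | cons h t ih =>
    cases t with
    | nil => simp [pvAppendLast]
    | cons a b => simpa [pvAppendLast] using ih

-- the closed-form state A's fold reaches, expressed via B's detection list
def pvSpecSt (padding q : Int) (dets : List Int) (n : Int) : Bool × Int × Int × List (List Int) :=
  match dets with
  | [] => (false, n, n, [])
  | d0 :: rest =>
    let gc := rest.foldl (pvGroupStep q) ([], d0, d0)
    let l := gc.2.2
    let opened : Bool := decide (n ≤ l + q)
    (opened, n,
     (if opened = true then n - 1 - l else n - 1 - l - q),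
     gc.1.map (fun g => [max (g.1 - padding) 0, g.2 + q]) ++
       [if opened = true then [max (gc.2.1 - padding) 0]
        else [max (gc.2.1 - padding) 0, gc.2.2 + q]])

-- side invariant on B's grouping state
def pvSide (q : Int) (dets : List Int) (n : Int) : Prop :=
  match dets with
  | [] => True
  | d0 :: rest =>
    let gc := rest.foldl (pvGroupStep q) ([], d0, d0)
    gc.2.2 ≤ n - 1 ∧ ∀ g ∈ gc.1, g.2 + q < n

lemma pvStepTrue (padding q : Int) (hq : q = max padding 0 + 1) (dets : List Int) (n : Int)
    (hs : pvSide q dets n) :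
    pvAStep padding (pvSpecSt padding q dets n) true = pvSpecSt padding q (dets ++ [n]) (n + 1) ∧
    pvSide q (dets ++ [n]) (n + 1) := by
  cases dets with
  | nil =>
    constructor <;> simp [pvSpecSt, pvSide, pvAStep] <;> omega
  | cons d0 rest =>
    simp only [pvSide, pvSpecSt, List.cons_append, List.foldl_append, List.foldl_cons,
      List.foldl_nil] at hs ⊢
    set gc := rest.foldl (pvGroupStep q) ([], d0, d0) with hgc
    obtain ⟨hl, hmem⟩ := hs
    by_cases hop : n ≤ gc.2.2 + q
    · have hstep : pvGroupStep q gc n = (gc.1, gc.2.1, n) := by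
        unfold pvGroupStep; rw [if_neg (by omega)]
      rw [hstep]
      constructor
      · simp [pvAStep, hop]; omega
      · refine ⟨by simp <;> omega, fun g hg => ?_⟩
        simp at hg
        have := hmem g hg; omega
    · have hstep : pvGroupStep q gc n = (gc.1 ++ [gc.2], n, n) := by
        unfold pvGroupStep; rw [if_pos (by omega)]
      rw [hstep]
      constructor
      · simp [pvAStep, hop]; omega
      · refine ⟨by simp <;> omega, fun g hg => ?_⟩
        simp at hg
        rcases hg with h | h
        · have := hmem g h; omega
        · subst h; simp; omega

lemma pvStepFalse (padding q : Int) (hq : q = max padding 0 + 1) (dets : List Int) (n : Int)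
    (hs : pvSide q dets n) :
    pvAStep padding (pvSpecSt padding q dets n) false = pvSpecSt padding q dets (n + 1) ∧
    pvSide q dets (n + 1) := by
  cases dets with
  | nil =>
    constructor <;> simp [pvSpecSt, pvSide, pvAStep] <;> omega
  | cons d0 rest =>
    simp only [pvSide, pvSpecSt] at hs ⊢
    set gc := rest.foldl (pvGroupStep q) ([], d0, d0) with hgc
    obtain ⟨hl, hmem⟩ := hs
    by_cases hop : n ≤ gc.2.2 + q
    · by_cases hcl : n = gc.2.2 + q
      · constructor
        · simp [pvAStep, hop, show ¬ (n + 1 ≤ gc.2.2 + q) by omega,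
            show n - 1 - gc.2.2 + 1 > padding by omega, pvAppendLast_append]
          omega
        · exact ⟨by omega, fun g hg => by have := hmem g hg; omega⟩
      · constructor
        · simp [pvAStep, hop, show (n + 1 ≤ gc.2.2 + q) by omega,
            show ¬ (n - 1 - gc.2.2 + 1 > padding) by omega]
          omega
        · exact ⟨by omega, fun g hg => by have := hmem g hg; omega⟩
    · constructor
      · simp [pvAStep, hop, show ¬ (n + 1 ≤ gc.2.2 + q) by omega]
        omega
      · exact ⟨by omega, fun g hg => by have := hmem g hg; omega⟩

lemma pvMain (padding : Int) (fs : List Bool) :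
    fs.foldl (pvAStep padding) (false, 0, 0, []) =
      pvSpecSt padding (max padding 0 + 1)
        (fs.foldl pvBStep ([], 0)).1 (fs.foldl pvBStep ([], 0)).2
    ∧ pvSide (max padding 0 + 1) (fs.foldl pvBStep ([], 0)).1 (fs.foldl pvBStep ([], 0)).2 := by
  induction fs using List.reverseRecOn with
  | nil => exact ⟨rfl, trivial⟩
  | append_singleton fs f ih =>
    obtain ⟨ihA, ihS⟩ := ih
    rw [List.foldl_append, List.foldl_append, ihA]
    simp only [List.foldl_cons, List.foldl_nil]
    cases f with
    | true =>
      have h := pvStepTrue padding _ rfl (fs.foldl pvBStep ([], 0)).1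
        (fs.foldl pvBStep ([], 0)).2 ihS
      simpa [pvBStep] using h
    | false =>
      have h := pvStepFalse padding _ rfl (fs.foldl pvBStep ([], 0)).1
        (fs.foldl pvBStep ([], 0)).2 ihS
      simpa [pvBStep] using h

lemma pvFinal (num_frames padding : Int) (fs : List Bool) :
    (match (fs.foldl (pvAStep padding) (false, 0, 0, [])).2.2.2.getLast? with
      | some c => if c.length < 2 then
          pvAppendLast (fs.foldl (pvAStep padding) (false, 0, 0, [])).2.2.2 (num_frames - 1)
        else (fs.foldl (pvAStep padding) (false, 0, 0, [])).2.2.2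
      | none => (fs.foldl (pvAStep padding) (false, 0, 0, [])).2.2.2) =
    (match (fs.foldl pvBStep ([], 0)).1 with
      | [] => []
      | d0 :: rest =>
        let q := max padding 0 + 1
        let gc := rest.foldl (pvGroupStep q) ([], d0, d0)
        (gc.1 ++ [gc.2]).map (fun g =>
          if g.2 + q < (fs.foldl pvBStep ([], 0)).2 then [max (g.1 - padding) 0, g.2 + q]
          else [max (g.1 - padding) 0, num_frames - 1])) := by
  obtain ⟨hA, hS⟩ := pvMain padding fs
  rw [hA]
  set q := max padding 0 + 1 with hq
  set dn := fs.foldl pvBStep ([], 0) with hdn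
  obtain ⟨dets, n⟩ := dn
  cases dets with
  | nil => simp [pvSpecSt]
  | cons d0 rest =>
    simp only [pvSpecSt, pvSide] at hS ⊢
    set gc := rest.foldl (pvGroupStep q) ([], d0, d0) with hgc
    obtain ⟨hl, hmem⟩ := hS
    have hmapmid : gc.1.map (fun g => [max (g.1 - padding) 0, g.2 + q]) =
        gc.1.map (fun g =>
          if g.2 + q < n then [max (g.1 - padding) 0, g.2 + q]
          else [max (g.1 - padding) 0, num_frames - 1]) := by
      apply List.map_congr_left
      intro g hg
      simp [hmem g hg]
    by_cases hop : n ≤ gc.2.2 + q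
    · -- last clip is open: A patches in num_frames - 1, B's condition fails
      have : ¬ (gc.2.2 + q < n) := by omega
      simp only [hop, decide_true, List.map_append,
        List.getLast?_append, List.getLast?_singleton]
      simp [pvAppendLast_append, hmapmid, this]
    · have hcl : gc.2.2 + q < n := by omega
      simp only [hop, decide_false, List.map_append,
        List.getLast?_append, List.getLast?_singleton]
      have : ¬ ((if (false : Bool) = true then [max (gc.2.1 - padding) 0]
          else [max (gc.2.1 - padding) 0, gc.2.2 + q]).length < 2) := by simp
      simp [hmapmid, hcl]

-- ===== VERDICT (by name: the statement is the Claim_ definition above) =====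
theorem calculate_clip_bounds_spec : Claim_equal_calculate_clip_bounds := by
  intro batches num_frames padding _
  show _ = _
  unfold calculate_clip_bounds calculate_clip_bounds_alt
  rw [← List.foldl_flatten, ← List.foldl_flatten]
  exact pvFinal num_frames padding batches.flatten
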